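-- pv_equiv track=rewrite | github.com/MrBrantCode/unitest_baseline | mut_generate/mist_train_cf/cf_73936/solution.py | least_frequent_last
-- ===== SOURCE A (Python) =====
-- def least_frequent_last(s):
--     counts = {}
--     for char in s:
--         if char.isalpha():
--             if char in counts:
--                 counts[char] += 1
--             else:
--                 counts[char] = 1
--
--     least_frequent = min(counts, key=counts.get)
--     for char in reversed(s):
--         if char.isalpha() and counts[char] == counts[least_frequent]:
--             return char
--
--     return least_frequent
-- ===== SOURCE B (Python) =====
-- def least_frequent_last(s):
--     letters = [c for c in s if c.isalpha()]
--     distinct = []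
--     for c in letters:
--         if c not in distinct:
--             distinct.append(c)
--     m = min(letters.count(c) for c in distinct)
--     candidates = [c for c in distinct if letters.count(c) == m]
--     rev = letters[::-1]
--     return min(candidates, key=rev.index)
-- ===== Notes on version B (the rewrite author's own statement) =====
-- stated objective: alternative
-- what changed: The dict counter with argmin-over-keys and reversed early-return scan is replaced by a dict-free pipeline: filter letters into a list, dedup, counts via list.count, compute the minimum count, filter the candidate set of minimal-count letters, and select the one occurring latest via min(candidates, key=rev.index); it trades A's O(n) counting for O(n*k) list.count calls.
import Mathlib
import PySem

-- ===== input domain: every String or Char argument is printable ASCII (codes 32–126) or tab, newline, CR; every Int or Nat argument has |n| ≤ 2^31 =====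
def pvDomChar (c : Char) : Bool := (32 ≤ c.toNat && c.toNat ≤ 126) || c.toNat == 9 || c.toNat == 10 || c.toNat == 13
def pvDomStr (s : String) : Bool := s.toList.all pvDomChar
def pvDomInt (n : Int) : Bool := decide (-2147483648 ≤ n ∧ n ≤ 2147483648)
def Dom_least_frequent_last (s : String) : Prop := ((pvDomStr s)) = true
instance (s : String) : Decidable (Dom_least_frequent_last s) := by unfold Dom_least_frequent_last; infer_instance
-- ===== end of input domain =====

-- B drops A's dict counter and reversed early-return scan for a dict-free pipeline:
-- letter list, dedup, list.count frequencies, candidate set of minimal count, selection by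
-- min(candidates, key=rev.index) (objective: alternative decomposition, same result).

-- ===== PORT A =====
-- A's counting loop:
-- for char in s: if char.isalpha(): if char in counts: counts[char] += 1 else: counts[char] = 1
def lflCounts (s : String) : PySem.Dict Char Int :=
  s.toList.foldl (fun d c =>
    if PySem.Chars.isalpha c then
      (if d.contains c then d.modify c 0 (· + 1) else d.insert c 1)
    else d) PySem.Dict.empty

-- A's reversed early-return loop: for char in reversed(s): if char.isalpha() and counts[char] == counts[least_frequent]: return char
def lflScan (cnt : PySem.Dict Char Int) (m : Int) : List Char → Option Char
  | [] => none
  | c :: rest =>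
      if PySem.Chars.isalpha c && (cnt.getD c 0 == m) then some c else lflScan cnt m rest

def least_frequent_last (s : String) : String :=
  let counts := lflCounts s
  -- min(counts, key=counts.get): counts.get k = counts[k] on every key, ported as getD k 0 (exact on keys)
  match PySem.List.min? counts.keys (fun c => counts.getD c 0) with
  | none => ""          -- min() of an empty dict: Python raises ValueError here (excluded by Pre_)
  | some lf =>
      match lflScan counts (counts.getD lf 0) s.toList.reverse with
      | some c => String.ofList [c]
      | none => String.ofList [lf]

-- ===== PORT B =====
def least_frequent_last_alt (s : String) : String :=
  -- letters = [c for c in s if c.isalpha()]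
  let letters := s.toList.filter PySem.Chars.isalpha
  -- for c in letters: if c not in distinct: distinct.append(c)
  let distinct := letters.foldl PySem.Set.add []
  -- m = min(letters.count(c) for c in distinct)
  match PySem.List.min? (distinct.map (fun c => (letters.count c : Int))) (fun x => x) with
  | none => ""          -- min() of an empty generator: Python raises ValueError here (excluded by Pre_)
  | some m =>
      -- candidates = [c for c in distinct if letters.count(c) == m]
      let candidates := distinct.filter (fun c => (letters.count c : Int) == m)
      -- rev = letters[::-1]
      let rev := letters.reverse
      -- min(candidates, key=rev.index); rev.index never raises on candidates, ported getD 0 (exact on members)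
      match PySem.List.min? candidates (fun c => (PySem.List.index? rev c).getD 0) with
      | none => ""      -- min() of an empty list raises; unreachable once letters ≠ [] (excluded by Pre_)
      | some c => String.ofList [c]

-- ===== PRECONDITION & SPEC =====
-- Pre_ excludes exactly the strings with no alphabetic character, on which A (and B) raise ValueError.
def Pre_least_frequent_last (s : String) : Prop := s.toList.any PySem.Chars.isalpha = true
instance (s : String) : Decidable (Pre_least_frequent_last s) := by unfold Pre_least_frequent_last; infer_instance
def pvWitness_least_frequent_last : String := "ab"

def Spec_least_frequent_last (s : String) (out : String) : Prop := out = least_frequent_last_alt s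
instance (s : String) (out : String) : Decidable (Spec_least_frequent_last s out) := by unfold Spec_least_frequent_last; infer_instance

-- ===== CLAIM (what is proved, stated in full; the proofs are below) =====
def Claim_equal_least_frequent_last : Prop := ∀ (s : String), Dom_least_frequent_last s → Pre_least_frequent_last s → Spec_least_frequent_last s (least_frequent_last s)

-- ===== LEMMAS AND PROOFS =====

-- the counting loop of A is Counter(filter(isalpha, s))
theorem lflCounts_eq (s : String) :
    lflCounts s = PySem.Dict.counter (s.toList.filter PySem.Chars.isalpha) := by
  unfold lflCounts
  rw [PySem.List.foldl_if_eq_foldl_filter, ← PySem.Dict.foldl_insert_getD_add_one_eq_counter]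
  apply PySem.List.foldl_congr_mem
  intro acc x _
  by_cases h : acc.contains x = true
  · simp [h, PySem.Dict.modify]
  · simp only [h, if_false, Bool.false_eq_true]
    rw [PySem.Dict.getD_of_not_contains acc 0 (by simpa using h)]
    norm_num

-- A's scan is find? on the reversed list
theorem lflScan_eq (cnt : PySem.Dict Char Int) (m : Int) (l : List Char) :
    lflScan cnt m l = l.find? (fun c => PySem.Chars.isalpha c && (cnt.getD c 0 == m)) := by
  induction l with
  | nil => rfl
  | cons c t ih =>
      cases h : (PySem.Chars.isalpha c && (cnt.getD c 0 == m)) <;>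
        simp [lflScan, List.find?, h, ih]

-- B's selection by first index equals A's first-match scan: the minimal-rev.index candidate
-- is the first element of rev whose value satisfies q.
theorem find?_eq_min?_index (rev cands : List Char) (q : Char → Bool)
    (hmem : ∀ c, c ∈ cands ↔ (c ∈ rev ∧ q c = true)) (hne : cands ≠ []) :
    rev.find? q = PySem.List.min? cands (fun c => (PySem.List.index? rev c).getD 0) := by
  obtain ⟨cm, hcm⟩ : ∃ cm, PySem.List.min? cands (fun c => (PySem.List.index? rev c).getD 0) = some cm := by
    cases h : PySem.List.min? cands (fun c => (PySem.List.index? rev c).getD 0) with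
    | none => exact absurd ((PySem.List.min?_eq_none_iff _ _).mp h) hne
    | some cm => exact ⟨cm, rfl⟩
  have hcmc : cm ∈ cands := PySem.List.min?_mem hcm
  have hmin := PySem.List.min?_isMin hcm
  obtain ⟨hcmrev, hcmq⟩ := (hmem cm).mp hcmc
  obtain ⟨i, hi⟩ := Option.isSome_iff_exists.mp ((PySem.List.index?_isSome_iff rev cm).mpr hcmrev)
  obtain ⟨hilt, hival, hifirst⟩ := PySem.List.getElem_of_index?_eq_some hi
  have hkeycm : (PySem.List.index? rev cm).getD 0 = i := by rw [hi]; rfl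
  rw [hcm, List.find?_eq_some_iff_append]
  refine ⟨hcmq, rev.take i, rev.drop (i + 1), ?_, ?_⟩
  · conv_lhs => rw [← List.take_append_drop i rev]
    rw [List.drop_eq_getElem_cons hilt, hival]
  · intro a ha
    simp only [Bool.not_eq_true']
    by_contra hq
    have hqa : q a = true := by simpa using hq
    obtain ⟨j, hjlt, hja⟩ := List.mem_iff_getElem.mp ha
    have hjlt' : j < i := lt_of_lt_of_le hjlt (by simp [List.length_take])
    have hja' : rev[j]'(lt_of_lt_of_le hjlt' (le_of_lt hilt)) = a := by
      rw [← hja, List.getElem_take]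
    have harev : a ∈ rev := hja' ▸ List.getElem_mem _
    have hacands : a ∈ cands := (hmem a).mpr ⟨harev, hqa⟩
    obtain ⟨ja, hjaeq⟩ := Option.isSome_iff_exists.mp ((PySem.List.index?_isSome_iff rev a).mpr harev)
    obtain ⟨hjalt, hjaval, hjafirst⟩ := PySem.List.getElem_of_index?_eq_some hjaeq
    have hle : i ≤ ja := by have := hmin a hacands; rw [hkeycm, hjaeq] at this; simpa using this
    -- a occurs at index j < i ≤ ja, contradicting minimality of ja
    by_cases hjja : j < ja
    · exact (hjafirst j hjja) hja'
    · omega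
-- (the by_cases closes: if ¬ j < ja then ja ≤ j < i ≤ ja)

theorem least_frequent_last_main (s : String)
    (hpre : s.toList.any PySem.Chars.isalpha = true) :
    least_frequent_last s = least_frequent_last_alt s := by
  simp only [least_frequent_last, least_frequent_last_alt, lflCounts_eq,
    ← PySem.Set.ofList_eq_foldl]
  set al := s.toList.filter PySem.Chars.isalpha with hal_def
  set cnt := PySem.Dict.counter al with hcnt_def
  obtain ⟨x, hxL, hxA⟩ := List.any_eq_true.mp hpre
  have hxal : x ∈ al := by simp [hal_def, List.mem_filter, hxL, hxA]
  have hkeys : cnt.keys = PySem.Set.ofList al := PySem.Dict.keys_counter al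
  have hknil : cnt.keys ≠ [] := by
    intro h
    have := (PySem.Set.mem_ofList al x).mpr hxal
    rw [← hkeys, h] at this
    exact List.not_mem_nil this
  -- A's least_frequent
  obtain ⟨lf, hlf⟩ : ∃ lf, PySem.List.min? cnt.keys (fun c => cnt.getD c 0) = some lf := by
    cases h : PySem.List.min? cnt.keys (fun c => cnt.getD c 0) with
    | none => exact absurd ((PySem.List.min?_eq_none_iff _ _).mp h) hknil
    | some lf => exact ⟨lf, rfl⟩
  have hlfk : lf ∈ cnt.keys := PySem.List.min?_mem hlf
  -- B's minimum value m
  obtain ⟨m, hm⟩ : ∃ m, PySem.List.min?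
      ((PySem.Set.ofList al).map (fun c => (al.count c : Int))) (fun x => x) = some m := by
    cases h : PySem.List.min? ((PySem.Set.ofList al).map (fun c => (al.count c : Int))) (fun x => x) with
    | none =>
        have := (PySem.List.min?_eq_none_iff _ _).mp h
        rw [List.map_eq_nil_iff] at this
        exact absurd (hkeys ▸ this) hknil
    | some m => exact ⟨m, rfl⟩
  -- the two minima agree : cnt.getD lf 0 = m
  have hgetD : ∀ c, cnt.getD c 0 = (al.count c : Int) := fun c => PySem.Dict.getD_counter al c
  have hmm : cnt.getD lf 0 = m := by
    obtain ⟨k0, hk0, hk0v⟩ := List.mem_map.mp (PySem.List.min?_mem hm)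
    have h1 : m ≤ cnt.getD lf 0 := by
      have := PySem.List.min?_isMin hm (cnt.getD lf 0)
        (by rw [hgetD lf]; exact List.mem_map_of_mem (hkeys ▸ hlfk))
      simpa using this
    have h2 : cnt.getD lf 0 ≤ m := by
      have := PySem.List.min?_isMin hlf k0 (hkeys ▸ hk0)
      rw [hgetD k0, hk0v] at this
      exact this
    omega
  -- candidates are nonempty
  obtain ⟨k0, hk0, hk0v⟩ := List.mem_map.mp (PySem.List.min?_mem hm)
  have hcands_ne : (PySem.Set.ofList al).filter (fun c => (al.count c : Int) == m) ≠ [] := by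
    intro h
    have : k0 ∈ (PySem.Set.ofList al).filter (fun c => (al.count c : Int) == m) :=
      List.mem_filter.mpr ⟨hk0, by simp [hk0v]⟩
    rw [h] at this
    exact List.not_mem_nil this
  -- A's scan = B's min-by-index selection
  have hfp : s.toList.reverse.find? (fun c => PySem.Chars.isalpha c && (cnt.getD c 0 == m))
      = al.reverse.find? (fun c => (al.count c : Int) == m) := by
    have hrev : al.reverse = s.toList.reverse.filter PySem.Chars.isalpha := by
      rw [hal_def, List.filter_reverse]
    have hpq : (fun c => PySem.Chars.isalpha c && (cnt.getD c 0 == m))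
        = (fun c => PySem.Chars.isalpha c && ((al.count c : Int) == m)) := by
      funext c; rw [hgetD c]
    rw [hpq, hrev, List.find?_filter]
    congr 1
    funext c
    rw [Bool.eq_iff_iff]
    simp
  have hsel := find?_eq_min?_index al.reverse
    ((PySem.Set.ofList al).filter (fun c => (al.count c : Int) == m))
    (fun c => (al.count c : Int) == m)
    (by
      intro c
      simp [List.mem_filter, PySem.Set.mem_ofList, List.mem_reverse])
    hcands_ne
  obtain ⟨cm, hcm⟩ : ∃ cm, PySem.List.min?
      ((PySem.Set.ofList al).filter (fun c => (al.count c : Int) == m))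
      (fun c => (PySem.List.index? al.reverse c).getD 0) = some cm := by
    cases h : PySem.List.min? ((PySem.Set.ofList al).filter (fun c => (al.count c : Int) == m))
        (fun c => (PySem.List.index? al.reverse c).getD 0) with
    | none => exact absurd ((PySem.List.min?_eq_none_iff _ _).mp h) hcands_ne
    | some cm => exact ⟨cm, rfl⟩
  rw [hlf, hm]
  simp only [lflScan_eq, hmm, hfp, hsel, hcm]

-- ===== VERDICT (by name: the statement is the Claim_ definition above) =====
theorem least_frequent_last_spec : Claim_equal_least_frequent_last := by
  intro s _ hpre
  unfold Spec_least_frequent_last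
  exact least_frequent_last_main s hpre
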